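-- pv_equiv track=rewrite | github.com/NilenduGanguli/nlp2sql | knowledge_graph/column_value_cache.py | is_likely_enum_column
-- ===== SOURCE A (Python) =====
-- _ENUM_WORDS = {
--     "STATUS", "TYPE", "FLAG", "CODE", "CATEGORY", "LEVEL", "TIER",
--     "CLASS", "STATE", "REASON", "KIND", "MODE", "PRIORITY", "GENDER",
--     "STAGE", "PHASE", "RATING", "INDICATOR", "ACTIVE", "ENABLED",
--     "CURRENCY", "COUNTRY", "GRADE", "BUCKET", "SEGMENT",
--     "ROLE", "METHOD", "CHANNEL", "SOURCE", "SCOPE", "RELATIONSHIP",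
-- }
--
-- _ENUM_ABBREV_SUFFIXES = {
--     "CD", "TYP", "FLG", "STS", "CAT", "LVL", "RSK", "RSN",
--     "IND", "PRI", "GRP", "TY", "CTGY", "SEG",
-- }
--
-- _FLAG_PREFIXES = ("IS_", "HAS_", "CAN_", "ALLOW_", "ENABLE_")
--
-- def is_likely_enum_column(
--     column_name: str,
--     data_type: str = "",
--     data_length: int = 0,
--     data_precision: int = 0,
-- ) -> bool:
--     """
--     Return True if this column is likely to hold a small fixed set of values.
--
--     Layered checks (any match → True):
--       1. Whole-word enum name (STATUS, RISK_LEVEL, ACCOUNT_STATUS, …)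
--       2. Abbreviation suffix (_CD, _TYP, _LVL, _FLG, _STS, …)
--       3. Boolean-flag name prefix (IS_, HAS_, CAN_, …)
--       4. Short string types (CHAR ≤ 5, VARCHAR2 ≤ 15)
--       5. Tiny numeric (NUMBER with precision 1..3) — flag-like
--     """
--     upper = column_name.upper()
--     dtype = (data_type or "").upper()
--
--     for word in _ENUM_WORDS:
--         if upper == word or upper.endswith(f"_{word}") or upper.startswith(f"{word}_"):
--             return True
--
--     if "_" in upper:
--         suffix = upper.rsplit("_", 1)[-1]
--         if suffix in _ENUM_ABBREV_SUFFIXES: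
--             return True
--
--     for prefix in _FLAG_PREFIXES:
--         if upper.startswith(prefix):
--             return True
--
--     if dtype == "CHAR" and 0 < data_length <= 5:
--         return True
--     if dtype == "VARCHAR2" and 0 < data_length <= 15:
--         return True
--
--     if dtype == "NUMBER" and 0 < data_precision <= 3:
--         return True
--
--     return False
-- ===== SOURCE B (Python) =====
-- _ENUM_WORDS = {
--     "STATUS", "TYPE", "FLAG", "CODE", "CATEGORY", "LEVEL", "TIER",
--     "CLASS", "STATE", "REASON", "KIND", "MODE", "PRIORITY", "GENDER",
--     "STAGE", "PHASE", "RATING", "INDICATOR", "ACTIVE", "ENABLED",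
--     "CURRENCY", "COUNTRY", "GRADE", "BUCKET", "SEGMENT",
--     "ROLE", "METHOD", "CHANNEL", "SOURCE", "SCOPE", "RELATIONSHIP",
-- }
--
-- _ENUM_ABBREV_SUFFIXES = {
--     "CD", "TYP", "FLG", "STS", "CAT", "LVL", "RSK", "RSN",
--     "IND", "PRI", "GRP", "TY", "CTGY", "SEG",
-- }
--
-- _FLAG_WORDS = {"IS", "HAS", "CAN", "ALLOW", "ENABLE"}
--
--
-- def is_likely_enum_column(
--     column_name: str,
--     data_type: str = "",
--     data_length: int = 0,
--     data_precision: int = 0,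
-- ) -> bool:
--     # Tokenize once: only the first and last '_'-separated tokens matter.
--     parts = column_name.upper().split("_")
--     first, last = parts[0], parts[-1]
--
--     if first in _ENUM_WORDS or last in _ENUM_WORDS:
--         return True
--     if len(parts) > 1 and (last in _ENUM_ABBREV_SUFFIXES or first in _FLAG_WORDS):
--         return True
--
--     dtype = data_type.upper()
--     return ((dtype == "CHAR" and 0 < data_length <= 5)
--             or (dtype == "VARCHAR2" and 0 < data_length <= 15)
--             or (dtype == "NUMBER" and 0 < data_precision <= 3))
-- ===== Notes on version B (the rewrite author's own statement) =====
-- stated objective: simpler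
-- what changed: B replaces A's scan over all 31 enum words with per-word equality/endswith/startswith tests by tokenizing the name once at underscores and looking up only the first and last tokens in the word/suffix/flag sets.
import Mathlib
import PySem

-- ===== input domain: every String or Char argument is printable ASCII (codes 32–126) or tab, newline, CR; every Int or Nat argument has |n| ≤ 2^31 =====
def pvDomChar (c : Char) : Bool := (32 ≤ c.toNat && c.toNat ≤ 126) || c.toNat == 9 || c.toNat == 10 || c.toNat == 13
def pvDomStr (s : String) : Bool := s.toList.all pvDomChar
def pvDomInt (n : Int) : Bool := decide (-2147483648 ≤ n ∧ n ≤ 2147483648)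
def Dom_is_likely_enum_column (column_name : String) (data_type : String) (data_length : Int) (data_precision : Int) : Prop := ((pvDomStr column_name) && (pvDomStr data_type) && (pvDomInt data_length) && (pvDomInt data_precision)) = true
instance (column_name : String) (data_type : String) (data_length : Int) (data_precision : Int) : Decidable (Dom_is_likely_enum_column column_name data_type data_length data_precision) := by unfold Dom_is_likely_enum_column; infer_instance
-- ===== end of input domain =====

-- B replaces A's scan over all 31 enum words (equality/endswith/startswith per word) by tokenizing
-- the name once at underscores and testing only its first and last tokens (objective: simpler).

-- ===== PORT A =====
-- the module-level word sets, as lists of char-lists (used for membership / any-match only, so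
-- Python's arbitrary set iteration order is irrelevant)
def pvEnumWords : List (List Char) :=
  ["STATUS", "TYPE", "FLAG", "CODE", "CATEGORY", "LEVEL", "TIER", "CLASS", "STATE", "REASON", "KIND", "MODE", "PRIORITY", "GENDER", "STAGE", "PHASE", "RATING", "INDICATOR", "ACTIVE", "ENABLED", "CURRENCY", "COUNTRY", "GRADE", "BUCKET", "SEGMENT", "ROLE", "METHOD", "CHANNEL", "SOURCE", "SCOPE", "RELATIONSHIP"].map String.toList
def pvEnumAbbrevSuffixes : List (List Char) :=
  ["CD", "TYP", "FLG", "STS", "CAT", "LVL", "RSK", "RSN", "IND", "PRI", "GRP", "TY", "CTGY", "SEG"].map String.toList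
def pvFlagPrefixes : List (List Char) :=
  ["IS_", "HAS_", "CAN_", "ALLOW_", "ENABLE_"].map String.toList

-- rsplit("_", 1)[-1] ported by hand: the segment after the last '_' (exact; the whole string when
-- it has no '_', just as Python's rsplit gives)
def pvRsplitLast (u : List Char) : List Char := (u.reverse.takeWhile (· ≠ '_')).reverse

def is_likely_enum_column (column_name : String) (data_type : String) (data_length : Int) (data_precision : Int) : Bool :=
  let upper := PySem.Chars.upper column_name.toList
  -- (data_type or "").upper(): '' is the only falsy str
  let dtype := PySem.Chars.upper (if data_type = "" then [] else data_type.toList)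
  -- for word in _ENUM_WORDS: if … : return True   (early-returning any-match scan)
  if pvEnumWords.any (fun w =>
       upper == w || PySem.Chars.endswith upper ('_' :: w) || PySem.Chars.startswith upper (w ++ ['_'])) then true
  else if PySem.Chars.isIn ['_'] upper && pvEnumAbbrevSuffixes.contains (pvRsplitLast upper) then true
  else if pvFlagPrefixes.any (fun p => PySem.Chars.startswith upper p) then true
  else if dtype == "CHAR".toList && decide (0 < data_length) && decide (data_length ≤ 5) then true
  else if dtype == "VARCHAR2".toList && decide (0 < data_length) && decide (data_length ≤ 15) then true
  else if dtype == "NUMBER".toList && decide (0 < data_precision) && decide (data_precision ≤ 3) then true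
  else false

-- ===== PORT B =====
def pvFlagWords : List (List Char) := ["IS", "HAS", "CAN", "ALLOW", "ENABLE"].map String.toList

def is_likely_enum_column_alt (column_name : String) (data_type : String) (data_length : Int) (data_precision : Int) : Bool :=
  let parts := PySem.Chars.splitOn (PySem.Chars.upper column_name.toList) ['_']
  let first := parts.headD []      -- parts[0]; str.split always yields at least one piece
  let last := parts.getLastD []    -- parts[-1]
  if pvEnumWords.contains first || pvEnumWords.contains last then true
  else if decide (1 < parts.length) && (pvEnumAbbrevSuffixes.contains last || pvFlagWords.contains first) then true
  else
    let dtype := PySem.Chars.upper data_type.toList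
    (dtype == "CHAR".toList && decide (0 < data_length) && decide (data_length ≤ 5)) ||
    (dtype == "VARCHAR2".toList && decide (0 < data_length) && decide (data_length ≤ 15)) ||
    (dtype == "NUMBER".toList && decide (0 < data_precision) && decide (data_precision ≤ 3))

-- ===== PRECONDITION & SPEC =====
def Spec_is_likely_enum_column (column_name : String) (data_type : String) (data_length : Int) (data_precision : Int) (out : Bool) : Prop := out = is_likely_enum_column_alt column_name data_type data_length data_precision
instance (column_name : String) (data_type : String) (data_length : Int) (data_precision : Int) (out : Bool) : Decidable (Spec_is_likely_enum_column column_name data_type data_length data_precision out) := by unfold Spec_is_likely_enum_column; infer_instance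

-- ===== CLAIM (what is proved, stated in full; the proofs are below) =====
def Claim_equal_is_likely_enum_column : Prop := ∀ (column_name : String) (data_type : String) (data_length : Int) (data_precision : Int), Dom_is_likely_enum_column column_name data_type data_length data_precision → Spec_is_likely_enum_column column_name data_type data_length data_precision (is_likely_enum_column column_name data_type data_length data_precision)

-- ===== LEMMAS AND PROOFS =====

-- reference shape of Python's split('_') (plain structural form of splitOn.go's accumulator loop)
def pvSplit1 (pre : List Char) : List Char → List (List Char)
  | [] => [pre]
  | c :: rest => if c = '_' then pre :: pvSplit1 [] rest else pvSplit1 (pre ++ [c]) rest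

theorem pvSplit1_ne_nil (pre : List Char) (l : List Char) : pvSplit1 pre l ≠ [] := by
  induction l generalizing pre with
  | nil => simp [pvSplit1]
  | cons c rest ih => by_cases h : c = '_' <;> simp [pvSplit1, h, ih]

theorem pv_go_eq (l : List Char) : ∀ (fuel : Nat), l.length < fuel → ∀ (cur : List Char) (acc : List (List Char)),
    PySem.Chars.splitOn.go ['_'] fuel l cur acc = acc.reverse ++ pvSplit1 cur.reverse l := by
  induction l with
  | nil =>
    intro fuel h cur acc
    cases fuel with
    | zero => omega
    | succ f => simp [PySem.Chars.splitOn.go, pvSplit1]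
  | cons c rest ih =>
    intro fuel h cur acc
    cases fuel with
    | zero => simp at h
    | succ f =>
      by_cases hc : c = '_'
      · subst hc
        rw [show PySem.Chars.splitOn.go ['_'] (f+1) ('_' :: rest) cur acc
              = PySem.Chars.splitOn.go ['_'] f rest [] (cur.reverse :: acc) by
            simp [PySem.Chars.splitOn.go, List.isPrefixOf]]
        rw [ih f (by simpa using h) [] (cur.reverse :: acc)]
        simp [pvSplit1]
      · rw [show PySem.Chars.splitOn.go ['_'] (f+1) (c :: rest) cur acc
              = PySem.Chars.splitOn.go ['_'] f rest (c :: cur) acc by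
            simp [PySem.Chars.splitOn.go, List.isPrefixOf]
            intro h'; exact absurd h'.symm hc]
        rw [ih f (by simpa using h) (c :: cur) acc]
        simp [pvSplit1, hc]

theorem pv_splitOn_eq (l : List Char) : PySem.Chars.splitOn l ['_'] = pvSplit1 [] l := by
  have := pv_go_eq l (l.length + 1) (by omega) [] []
  simpa [PySem.Chars.splitOn] using this

theorem pv_headD_eq (l : List Char) : ∀ pre, (pvSplit1 pre l).headD [] = pre ++ l.takeWhile (· ≠ '_') := by
  induction l with
  | nil => intro pre; simp [pvSplit1]
  | cons c rest ih =>
    intro pre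
    by_cases h : c = '_'
    · simp [pvSplit1, h]
    · rw [show pvSplit1 pre (c :: rest) = pvSplit1 (pre ++ [c]) rest from by simp [pvSplit1, h],
          ih, List.takeWhile_cons]
      simp [h]

theorem pv_length_eq (l : List Char) : ∀ pre, (pvSplit1 pre l).length = l.count '_' + 1 := by
  induction l with
  | nil => intro pre; simp [pvSplit1]
  | cons c rest ih =>
    intro pre
    by_cases h : c = '_'
    · simp [pvSplit1, h, ih]
    · simp [pvSplit1, h, ih]

theorem pv_getLastD_default {α : Type} {l : List α} (h : l ≠ []) (d d' : α) :
    l.getLastD d = l.getLastD d' := by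
  cases l with
  | nil => exact absurd rfl h
  | cons a t => rw [List.getLastD_cons, List.getLastD_cons]

theorem pv_takeWhile_all {p : Char → Bool} {l : List Char} (h : ∀ x ∈ l, p x = true) :
    l.takeWhile p = l := by
  induction l with
  | nil => rfl
  | cons c rest ih =>
    rw [List.takeWhile_cons, if_pos (h c (by simp)), ih (fun x hx => h x (by simp [hx]))]

theorem pv_takeWhile_append_all {p : Char → Bool} {xs : List Char} (ys : List Char)
    (h : ∀ x ∈ xs, p x = true) : (xs ++ ys).takeWhile p = xs ++ ys.takeWhile p := by
  induction xs with
  | nil => rfl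
  | cons c rest ih =>
    rw [List.cons_append, List.takeWhile_cons, if_pos (h c (by simp)),
        ih (fun x hx => h x (by simp [hx])), List.cons_append]

theorem pv_takeWhile_append_stop {p : Char → Bool} {xs : List Char} (ys : List Char)
    (h : ∃ x ∈ xs, p x = false) : (xs ++ ys).takeWhile p = xs.takeWhile p := by
  induction xs with
  | nil => simp at h
  | cons c rest ih =>
    by_cases hc : p c
    · have hr : ∃ x ∈ rest, p x = false := by
        obtain ⟨x, hx, hpx⟩ := h
        rcases List.mem_cons.mp hx with hx | hx
        · subst hx; rw [hc] at hpx; simp at hpx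
        · exact ⟨x, hx, hpx⟩
      rw [List.cons_append, List.takeWhile_cons, if_pos hc, List.takeWhile_cons, if_pos hc, ih hr]
    · rw [List.cons_append, List.takeWhile_cons, if_neg hc, List.takeWhile_cons, if_neg hc]

theorem pv_ne_us_all {l : List Char} (h : '_' ∉ l) :
    ∀ x ∈ l, (fun x => decide (x ≠ '_')) x = true := by
  intro x hx
  simp only [decide_eq_true_eq]
  rintro rfl; exact h hx

theorem pvRsplitLast_no_us {l : List Char} (h : '_' ∉ l) : pvRsplitLast l = l := by
  unfold pvRsplitLast
  rw [pv_takeWhile_all (pv_ne_us_all (by simpa using h))]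
  simp

theorem pvRsplitLast_cons_us (rest : List Char) :
    pvRsplitLast ('_' :: rest) = if '_' ∈ rest then pvRsplitLast rest else rest := by
  unfold pvRsplitLast
  rw [show ('_' :: rest).reverse = rest.reverse ++ ['_'] from by simp]
  by_cases hm : '_' ∈ rest
  · rw [pv_takeWhile_append_stop ['_'] ⟨'_', by simpa using hm, by simp⟩, if_pos hm]
  · rw [pv_takeWhile_append_all ['_'] (pv_ne_us_all (by simpa using hm)), if_neg hm]
    simp

theorem pvRsplitLast_cons_ne {c : Char} (rest : List Char) (_h : c ≠ '_') (hm : '_' ∈ rest) :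
    pvRsplitLast (c :: rest) = pvRsplitLast rest := by
  unfold pvRsplitLast
  rw [show (c :: rest).reverse = rest.reverse ++ [c] from by simp,
      pv_takeWhile_append_stop [c] ⟨'_', by simpa using hm, by simp⟩]

theorem pv_getLastD_eq (l : List Char) : ∀ pre,
    (pvSplit1 pre l).getLastD [] = if '_' ∈ l then pvRsplitLast l else pre ++ l := by
  induction l with
  | nil => intro pre; simp [pvSplit1]
  | cons c rest ih =>
    intro pre
    by_cases h : c = '_'
    · subst h
      rw [show pvSplit1 pre ('_' :: rest) = pre :: pvSplit1 [] rest from by simp [pvSplit1]]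
      rw [List.getLastD_cons, pv_getLastD_default (pvSplit1_ne_nil [] rest) pre [], ih [],
          if_pos (show '_' ∈ '_' :: rest by simp), pvRsplitLast_cons_us]
      by_cases hm : '_' ∈ rest <;> simp [hm]
    · rw [show pvSplit1 pre (c :: rest) = pvSplit1 (pre ++ [c]) rest from by simp [pvSplit1, h],
          ih (pre ++ [c])]
      by_cases hm : '_' ∈ rest
      · rw [if_pos hm, if_pos (List.mem_cons_of_mem c hm), pvRsplitLast_cons_ne rest h hm]
      · rw [if_neg hm, if_neg (fun hh => by
          rcases List.mem_cons.mp hh with h' | h'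
          · exact h h'.symm
          · exact hm h')]
        simp

theorem pv_dropWhile_head {p : Char → Bool} :
    ∀ {l : List Char} {x : Char} {xs : List Char}, l.dropWhile p = x :: xs → p x = false := by
  intro l
  induction l with
  | nil => intro x xs h; simp at h
  | cons c rest ih =>
    intro x xs h
    by_cases hc : p c
    · rw [List.dropWhile_cons, if_pos hc] at h; exact ih h
    · rw [List.dropWhile_cons, if_neg hc] at h
      cases h; simpa using hc

theorem pv_first_eq_iff {w u : List Char} (hw : '_' ∉ w) :
    u.takeWhile (· ≠ '_') = w ↔ u = w ∨ (w ++ ['_']) <+: u := by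
  constructor
  · intro h
    have hsplit := List.takeWhile_append_dropWhile (p := fun x => decide (x ≠ '_')) (l := u)
    rcases hd : u.dropWhile (fun x => decide (x ≠ '_')) with _ | ⟨d, t⟩
    · left; rw [← hsplit, h, hd]; simp
    · right
      have hdus : d = '_' := by
        have := pv_dropWhile_head hd
        simpa using this
      subst hdus
      refine ⟨t, ?_⟩
      rw [← hsplit, h, hd]; simp
  · rintro (rfl | ⟨t, ht⟩)
    · exact pv_takeWhile_all (pv_ne_us_all hw)
    · rw [← ht, List.append_assoc, pv_takeWhile_append_all _ (pv_ne_us_all hw)]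
      simp

theorem pv_last_eq_iff {w u : List Char} (hw : '_' ∉ w) :
    pvRsplitLast u = w ↔ u = w ∨ ('_' :: w) <:+ u := by
  unfold pvRsplitLast
  have h1 : (u.reverse.takeWhile (· ≠ '_')).reverse = w ↔ u.reverse.takeWhile (· ≠ '_') = w.reverse := by
    constructor
    · intro h; rw [← h]; simp
    · intro h; rw [h]; simp
  rw [h1, pv_first_eq_iff (by simpa using hw)]
  constructor
  · rintro (h | h)
    · left; simpa using congrArg List.reverse h
    · right
      rw [show w.reverse ++ ['_'] = ('_' :: w).reverse from by simp] at h
      exact List.reverse_prefix.mp h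
  · rintro (rfl | h)
    · left; rfl
    · right
      rw [show w.reverse ++ ['_'] = ('_' :: w).reverse from by simp]
      exact List.reverse_prefix.mpr h

theorem pv_prefix_us_iff {w u : List Char} (hw : '_' ∉ w) :
    (w ++ ['_']) <+: u ↔ ('_' ∈ u ∧ u.takeWhile (· ≠ '_') = w) := by
  constructor
  · intro h
    obtain ⟨t, ht⟩ := h
    constructor
    · rw [← ht]; simp
    · exact (pv_first_eq_iff hw).mpr (Or.inr ⟨t, ht⟩)
  · rintro ⟨hm, hf⟩
    rcases (pv_first_eq_iff hw).mp hf with rfl | h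
    · exact absurd hm hw
    · exact h

theorem pv_words_no_us : ∀ w ∈ pvEnumWords, '_' ∉ w := by decide
theorem pv_flagwords_no_us : ∀ w ∈ pvFlagWords, '_' ∉ w := by decide
theorem pv_flagprefixes_eq : pvFlagPrefixes = pvFlagWords.map (fun w => w ++ ['_']) := by decide

theorem pv_name_eq (u : List Char) :
    (pvEnumWords.any fun w =>
        u == w || PySem.Chars.endswith u ('_' :: w) || PySem.Chars.startswith u (w ++ ['_']))
      = (pvEnumWords.contains (u.takeWhile (· ≠ '_')) || pvEnumWords.contains (pvRsplitLast u)) := by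
  rw [Bool.eq_iff_iff]
  simp only [List.any_eq_true, Bool.or_eq_true, beq_iff_eq, PySem.Chars.endswith_iff,
    PySem.Chars.startswith_iff, List.contains_eq_mem, decide_eq_true_eq]
  constructor
  · rintro ⟨w, hwmem, (h | h) | h⟩
    · left; rw [(pv_first_eq_iff (pv_words_no_us w hwmem)).mpr (Or.inl h)]; exact hwmem
    · right; rw [(pv_last_eq_iff (pv_words_no_us w hwmem)).mpr (Or.inr h)]; exact hwmem
    · left; rw [(pv_first_eq_iff (pv_words_no_us w hwmem)).mpr (Or.inr h)]; exact hwmem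
  · rintro (h | h)
    · refine ⟨_, h, ?_⟩
      rcases (pv_first_eq_iff (pv_words_no_us _ h)).mp rfl with h' | h'
      · exact Or.inl (Or.inl h')
      · exact Or.inr h'
    · refine ⟨_, h, ?_⟩
      rcases (pv_last_eq_iff (pv_words_no_us _ h)).mp rfl with h' | h'
      · exact Or.inl (Or.inl h')
      · exact Or.inl (Or.inr h')

theorem pv_flag_eq (u : List Char) :
    (pvFlagPrefixes.any fun p => PySem.Chars.startswith u p)
      = (decide ('_' ∈ u) && pvFlagWords.contains (u.takeWhile (· ≠ '_'))) := by
  rw [Bool.eq_iff_iff, pv_flagprefixes_eq]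
  simp only [List.any_map, List.any_eq_true, Function.comp, PySem.Chars.startswith_iff,
    Bool.and_eq_true, List.contains_eq_mem, decide_eq_true_eq]
  constructor
  · rintro ⟨w, hwmem, h⟩
    obtain ⟨hm, hf⟩ := (pv_prefix_us_iff (pv_flagwords_no_us w hwmem)).mp h
    exact ⟨hm, by rw [hf]; exact hwmem⟩
  · rintro ⟨hm, hf⟩
    exact ⟨_, hf, (pv_prefix_us_iff (pv_flagwords_no_us _ hf)).mpr ⟨hm, rfl⟩⟩

theorem pv_isIn_eq (u : List Char) : PySem.Chars.isIn ['_'] u = decide ('_' ∈ u) := by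
  rw [Bool.eq_iff_iff, PySem.Chars.isIn_iff_infix, decide_eq_true_eq]
  constructor
  · rintro ⟨s, t, h⟩; rw [← h]; simp
  · intro h
    obtain ⟨s, t, h⟩ := List.append_of_mem h
    exact ⟨s, t, by simp [h]⟩

theorem pv_len_eq (u : List Char) :
    decide (1 < (pvSplit1 [] u).length) = decide ('_' ∈ u) := by
  rw [pv_length_eq u []]
  simp [List.count_pos_iff]

theorem pv_headD_eq' (l : List Char) : (pvSplit1 [] l).headD [] = l.takeWhile (· ≠ '_') := by
  rw [pv_headD_eq l []]; rfl

theorem pv_getLastD_eq' (l : List Char) : (pvSplit1 [] l).getLastD [] = pvRsplitLast l := by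
  rw [pv_getLastD_eq l []]
  by_cases h : '_' ∈ l
  · rw [if_pos h]
  · rw [if_neg h, pvRsplitLast_no_us h]; rfl

theorem pv_orEmpty (s : String) : (if s = "" then ([] : List Char) else s.toList) = s.toList := by
  split_ifs with h
  · rw [h]; rfl
  · rfl

theorem pv_shape (a m s f d1 d2 d3 : Bool) :
    (if a then true else if m && s then true else if m && f then true
     else if d1 then true else if d2 then true else if d3 then true else false)
    = (if a then true else if m && (s || f) then true else (d1 || d2 || d3)) := by
  cases a <;> cases m <;> cases s <;> cases f <;> cases d1 <;> cases d2 <;> cases d3 <;> simp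

-- ===== VERDICT (by name: the statement is the Claim_ definition above) =====
theorem is_likely_enum_column_spec : Claim_equal_is_likely_enum_column := by
  intro column_name data_type data_length data_precision _
  unfold Spec_is_likely_enum_column
  simp only [is_likely_enum_column, is_likely_enum_column_alt]
  rw [pv_orEmpty, pv_splitOn_eq, pv_headD_eq', pv_getLastD_eq', pv_name_eq, pv_flag_eq, pv_isIn_eq,
      pv_len_eq]
  exact pv_shape _ _ _ _ _ _ _
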